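-- pv_equiv track=rewrite | github.com/FreeCAD/FreeCAD | src/Mod/Assembly/UtilsAssembly.py | extract_type_and_number
-- ===== SOURCE A (Python) =====
-- def extract_type_and_number(element_name):
--     element_type = ""
--     element_number = ""
--
--     for char in element_name:
--         if char.isalpha():
--             # If the character is a letter, it's part of the type
--             element_type += char
--         elif char.isdigit():
--             # If the character is a digit, it's part of the number
--             element_number += char
--         else:
--             break
--
--     if element_type and element_number:
--         element_number = int(element_number)
--         return element_type, element_number
--     else:
--         return None, None
-- ===== SOURCE B (Python) =====
-- def extract_type_and_number(element_name):
--     # B: take the maximal leading prefix of letters/digits, then two filter passes over it.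
--     end = 0
--     for c in element_name:
--         if not (c.isalpha() or c.isdigit()):
--             break
--         end += 1
--     prefix = element_name[:end]
--     element_type = ''.join(c for c in prefix if c.isalpha())
--     digits = ''.join(c for c in prefix if c.isdigit())
--     if element_type and digits:
--         return element_type, int(digits)
--     return None, None
-- ===== Notes on version B (the rewrite author's own statement) =====
-- stated objective: alternative
-- what changed: A routes each character in one interleaved loop with two growing accumulators; B first takes the maximal leading letter/digit prefix, then filters letters and digits out of it in two separate passes.
import Mathlib
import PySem

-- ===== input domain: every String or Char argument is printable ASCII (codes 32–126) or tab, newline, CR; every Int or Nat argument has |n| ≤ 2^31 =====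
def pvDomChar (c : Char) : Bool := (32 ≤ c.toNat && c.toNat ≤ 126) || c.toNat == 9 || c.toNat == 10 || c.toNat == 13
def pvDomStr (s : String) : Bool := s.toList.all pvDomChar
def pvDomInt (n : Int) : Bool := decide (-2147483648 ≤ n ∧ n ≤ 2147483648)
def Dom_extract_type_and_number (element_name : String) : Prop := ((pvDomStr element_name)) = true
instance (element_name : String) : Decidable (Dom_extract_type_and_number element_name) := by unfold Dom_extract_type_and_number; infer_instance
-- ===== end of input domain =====

-- B takes the maximal leading letter/digit prefix, then filters letters and digits in two
-- separate passes, instead of A's single interleaved accumulator loop (objective: alternative).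


-- ===== PORT A =====
-- A's loop: accumulate letters into `t` and digits into `n`, break at the first other char.
-- Python's str.isalpha/isdigit on a single ASCII char coincide with Char.isAlpha/Char.isDigit.
def pvGoA : List Char → List Char → List Char → List Char × List Char
  | [], t, n => (t, n)
  | c :: cs, t, n =>
    if c.isAlpha then pvGoA cs (t ++ [c]) n
    else if c.isDigit then pvGoA cs t (n ++ [c])
    else (t, n)

def extract_type_and_number (element_name : String) : Option String × Option Int :=
  let tn := pvGoA element_name.toList [] []
  if tn.1 ≠ [] ∧ tn.2 ≠ [] then
    -- int(element_number): tn.2 is a nonempty digit string here, so ofChars? never returns none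
    (some (String.ofList tn.1), some ((PySem.Int.ofChars? tn.2).getD 0))
  else (none, none)

-- ===== PORT B =====
def extract_type_and_number_alt (element_name : String) : Option String × Option Int :=
  -- B's counting break-loop computes exactly the maximal alnum prefix: List.takeWhile
  let pfx := element_name.toList.takeWhile (fun c => c.isAlpha || c.isDigit)
  let t := pfx.filter Char.isAlpha
  let n := pfx.filter Char.isDigit
  if t ≠ [] ∧ n ≠ [] then
    (some (String.ofList t), some ((PySem.Int.ofChars? n).getD 0))
  else (none, none)

-- ===== PRECONDITION & SPEC =====
def Spec_extract_type_and_number (element_name : String) (out : Option String × Option Int) : Prop := out = extract_type_and_number_alt element_name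
instance (element_name : String) (out : Option String × Option Int) : Decidable (Spec_extract_type_and_number element_name out) := by unfold Spec_extract_type_and_number; infer_instance

-- ===== CLAIM (what is proved, stated in full; the proofs are below) =====
def Claim_equal_extract_type_and_number : Prop := ∀ (element_name : String), Dom_extract_type_and_number element_name → Spec_extract_type_and_number element_name (extract_type_and_number element_name)

-- ===== LEMMAS AND PROOFS =====
lemma pv_not_digit_of_alpha {c : Char} (h : c.isAlpha = true) : c.isDigit = false := by
  simp [Char.isAlpha, Char.isUpper, Char.isLower, Char.isDigit, UInt32.le_iff_toNat_le] at *
  omega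

lemma pvGoA_eq (cs t n : List Char) :
    pvGoA cs t n =
      (t ++ (cs.takeWhile (fun c => c.isAlpha || c.isDigit)).filter Char.isAlpha,
       n ++ (cs.takeWhile (fun c => c.isAlpha || c.isDigit)).filter Char.isDigit) := by
  induction cs generalizing t n with
  | nil => simp [pvGoA]
  | cons c cs ih =>
    by_cases ha : c.isAlpha = true
    · simp [pvGoA, ha, ih, List.takeWhile, pv_not_digit_of_alpha ha]
    · by_cases hd : c.isDigit = true
      · simp [pvGoA, ha, hd, ih, List.takeWhile]
      · simp [pvGoA, ha, hd, List.takeWhile]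

-- ===== VERDICT (by name: the statement is the Claim_ definition above) =====
theorem extract_type_and_number_spec : Claim_equal_extract_type_and_number := by
  intro s _
  unfold Spec_extract_type_and_number extract_type_and_number extract_type_and_number_alt
  rw [pvGoA_eq]
  simp
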